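-- pv_equiv track=rewrite | github.com/Butskov/Bioinformatics-Algorithms | week11-12/27.py | breakpoints
-- ===== SOURCE A (Python) =====
-- def breakpoints(P):
--     adj = 0
--     for i in range(len(P) - 1):
--         if P[i + 1] - P[i] == 1:
--             adj += 1
--     if P[0] == 1:
--         adj += 1
--     if P[-1] == len(P):
--         adj += 1
--     return len(P) + 1 - adj
-- ===== SOURCE B (Python) =====
-- def breakpoints(P):
--     # Run-counting algorithm: extend with sentinel values 0 and n+1, count the maximal
--     # runs of consecutive (+1) integers with a nested scan; breakpoints = runs - 1.
--     Q = [0] + list(P) + [len(P) + 1]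
--     runs = 0
--     i = 0
--     while i < len(Q):
--         runs += 1
--         i += 1
--         while i < len(Q) and Q[i] == Q[i - 1] + 1:
--             i += 1
--     return runs - 1
-- ===== Notes on version B (the rewrite author's own statement) =====
-- stated objective: alternative
-- what changed: B counts maximal runs of consecutive (+1) integers in the sentinel-extended sequence 0,P...,n+1 with a nested two-level scan (outer loop per run, inner loop advancing through a run) and returns runs-1, instead of A's flat adjacency count over index pairs plus two boundary special-cases subtracted from n+1.
import Mathlib
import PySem

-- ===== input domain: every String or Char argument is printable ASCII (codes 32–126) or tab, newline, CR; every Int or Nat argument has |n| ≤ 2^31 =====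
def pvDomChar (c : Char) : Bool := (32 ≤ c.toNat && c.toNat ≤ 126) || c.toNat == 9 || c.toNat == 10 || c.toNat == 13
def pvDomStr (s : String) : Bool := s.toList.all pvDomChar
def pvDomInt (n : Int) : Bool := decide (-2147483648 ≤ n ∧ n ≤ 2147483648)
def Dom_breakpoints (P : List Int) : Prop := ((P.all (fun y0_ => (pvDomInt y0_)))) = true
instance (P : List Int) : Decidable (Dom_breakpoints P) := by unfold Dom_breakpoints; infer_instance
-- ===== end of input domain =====

-- B counts maximal runs of consecutive (+1) integers in the sentinel-extended sequence
-- 0,P...,n+1 with a nested two-level scan and returns runs-1, instead of A's flat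
-- adjacency count plus two boundary special-cases subtracted from n+1.

-- ===== PORT A =====
def breakpoints (P : List Int) : Int :=
  let adj : Int := (PySem.List.pyRange 0 ((P.length : Int) - 1) 1).foldl
    (fun adj i => if PySem.List.pyGetD P (i + 1) 0 - PySem.List.pyGetD P i 0 = 1 then adj + 1 else adj) 0
  let adj := if PySem.List.pyGetD P 0 0 = 1 then adj + 1 else adj
  let adj := if PySem.List.pyGetD P (-1) 0 = (P.length : Int) then adj + 1 else adj
  (P.length : Int) + 1 - adj

-- ===== PORT B =====
-- inner 'while i < len(Q) and Q[i] == Q[i-1] + 1: i += 1' (indices stay in range, so getD is exact)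
def bpSkip (Q : List Int) (i : Nat) : Nat :=
  if i < Q.length ∧ Q.getD i 0 = Q.getD (i - 1) 0 + 1 then bpSkip Q (i + 1) else i
termination_by Q.length - i
decreasing_by omega

lemma bpSkip_ge (Q : List Int) (i : Nat) : i ≤ bpSkip Q i := by
  induction i using bpSkip.induct Q with
  | case1 i h ih => rw [bpSkip, if_pos h]; omega
  | case2 i h => rw [bpSkip, if_neg h]

-- outer 'while i < len(Q): runs += 1; i += 1; <inner>'
def bpLoop (Q : List Int) (i : Nat) (runs : Int) : Int :=
  if i < Q.length then bpLoop Q (bpSkip Q (i + 1)) (runs + 1) else runs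
termination_by Q.length - i
decreasing_by have := bpSkip_ge Q (i + 1); omega

def breakpoints_alt (P : List Int) : Int :=
  let Q : List Int := 0 :: (P ++ [(P.length : Int) + 1])
  bpLoop Q 0 0 - 1

-- ===== PRECONDITION & SPEC =====
-- Pre_ excludes only the empty list, on which A raises IndexError when reading the first and last elements.
def Pre_breakpoints (P : List Int) : Prop := P ≠ []
instance (P : List Int) : Decidable (Pre_breakpoints P) := by unfold Pre_breakpoints; infer_instance
def pvWitness_breakpoints : List Int := [2, 1]

def Spec_breakpoints (P : List Int) (out : Int) : Prop := out = breakpoints_alt P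
instance (P : List Int) (out : Int) : Decidable (Spec_breakpoints P out) := by unfold Spec_breakpoints; infer_instance

-- ===== CLAIM (what is proved, stated in full; the proofs are below) =====
def Claim_equal_breakpoints : Prop := ∀ (P : List Int), Dom_breakpoints P → Pre_breakpoints P → Spec_breakpoints P (breakpoints P)

-- ===== LEMMAS AND PROOFS =====

-- number of 'bad' positions j (Q[j] ≠ Q[j-1]+1) in [k, Q.length)
def badCount (Q : List Int) (k : Nat) : Nat :=
  (List.range' k (Q.length - k)).countP (fun j => decide (¬ Q.getD j 0 = Q.getD (j - 1) 0 + 1))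

lemma badCount_cons (Q : List Int) (k : Nat) (hk : k < Q.length) :
    badCount Q k = (if Q.getD k 0 = Q.getD (k - 1) 0 + 1 then 0 else 1) + badCount Q (k + 1) := by
  unfold badCount
  rw [show Q.length - k = (Q.length - (k + 1)) + 1 by omega, List.range'_succ, List.countP_cons]
  by_cases h : Q.getD k 0 = Q.getD (k - 1) 0 + 1 <;>
    simp only [h, decide_true, decide_false, not_true_eq_false, not_false_eq_true,
      if_true, if_false] <;> simp [Nat.add_comm]

lemma bpSkip_le (Q : List Int) (i : Nat) (h : i ≤ Q.length) : bpSkip Q i ≤ Q.length := by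
  induction i using bpSkip.induct Q with
  | case1 i hc ih => rw [bpSkip, if_pos hc]; exact ih (by omega)
  | case2 i hc => rw [bpSkip, if_neg hc]; exact h

lemma badCount_skip (Q : List Int) (i : Nat) : badCount Q (bpSkip Q i) = badCount Q i := by
  induction i using bpSkip.induct Q with
  | case1 i hc ih =>
      rw [bpSkip, if_pos hc, ih, badCount_cons Q i hc.1, if_pos hc.2]; omega
  | case2 i hc => rw [bpSkip, if_neg hc]

lemma bpSkip_bad (Q : List Int) (i : Nat) (h : bpSkip Q i < Q.length) :
    ¬ Q.getD (bpSkip Q i) 0 = Q.getD (bpSkip Q i - 1) 0 + 1 := by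
  induction i using bpSkip.induct Q with
  | case1 i hc ih => rw [bpSkip, if_pos hc] at h ⊢; exact ih h
  | case2 i hc =>
      rw [bpSkip, if_neg hc] at h ⊢
      intro hg; exact hc ⟨h, hg⟩

lemma bpLoop_eq (Q : List Int) (i : Nat) (r : Int) (h : i < Q.length) :
    bpLoop Q i r = r + 1 + (badCount Q (i + 1) : Int) := by
  induction i, r using bpLoop.induct Q with
  | case1 i r hlt ih =>
      rw [bpLoop, if_pos hlt]
      by_cases hs : bpSkip Q (i + 1) < Q.length
      · rw [ih hs]
        have h1 : badCount Q (bpSkip Q (i + 1)) = badCount Q (i + 1) := badCount_skip Q (i + 1)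
        have h2 := badCount_cons Q (bpSkip Q (i + 1)) hs
        rw [if_neg (bpSkip_bad Q (i + 1) hs)] at h2
        omega
      · rw [bpLoop, if_neg hs]
        have hle : bpSkip Q (i + 1) ≤ Q.length := bpSkip_le Q (i + 1) (by omega)
        have h1 : badCount Q (bpSkip Q (i + 1)) = badCount Q (i + 1) := badCount_skip Q (i + 1)
        have h0 : badCount Q (bpSkip Q (i + 1)) = 0 := by
          unfold badCount
          rw [show Q.length - bpSkip Q (i + 1) = 0 by omega]
          simp
        omega
  | case2 i r hlt => omega

-- badCount over [1, Q.length) is the count of adjacent pairs of Q with difference ≠ 1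
lemma badCount_zip : ∀ (Q : List Int),
    badCount Q 1 = (Q.zip Q.tail).countP (fun ab => decide (ab.2 - ab.1 ≠ 1)) := by
  intro Q
  induction Q with
  | nil => simp [badCount]
  | cons x t ih =>
    cases t with
    | nil => simp [badCount]
    | cons y t' =>
      unfold badCount at ih ⊢
      simp only [List.length_cons, List.tail_cons, List.zip_cons_cons, List.countP_cons] at ih ⊢
      rw [show (t'.length + 1 + 1 - 1) = (t'.length + 1 - 1) + 1 by omega, List.range'_succ,
        List.countP_cons]
      have hmap : List.range' (1 + 1) (t'.length + 1 - 1) =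
          (List.range' 1 (t'.length + 1 - 1)).map (· + 1) := by
        rw [List.range'_eq_map_range, List.range'_eq_map_range, List.map_map]
        apply List.map_congr_left; intro a _; simp; omega
      rw [hmap, List.countP_map]
      have hc : (List.range' 1 (t'.length + 1 - 1)).countP
            ((fun j => decide ¬(x :: y :: t').getD j 0 = ((x :: y :: t').getD (j - 1) 0 + 1)) ∘ (· + 1))
          = (List.range' 1 (t'.length + 1 - 1)).countP
            (fun j => decide ¬(y :: t').getD j 0 = ((y :: t').getD (j - 1) 0 + 1)) := by
        apply List.countP_congr
        intro j hj
        have hj1 : 1 ≤ j := (List.mem_range'_1.mp hj).1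
        simp only [Function.comp]
        rw [show j + 1 - 1 = (j - 1) + 1 by omega]
        simp
      rw [hc, ih]
      have hpred : (decide ¬(x :: y :: t').getD 1 0 = ((x :: y :: t').getD (1 - 1) 0 + 1))
          = (decide ((x, y).2 - (x, y).1 ≠ 1)) := by
        by_cases hb : y - x = 1
        · simp [show y = x + 1 by omega]
        · simp [hb]; omega
      rw [hpred]

-- B in closed zip form over the sentinel-extended list
lemma alt_eq (P : List Int) :
    breakpoints_alt P =
      (((0 : Int) :: (P ++ [(P.length : Int) + 1])).zip (P ++ [(P.length : Int) + 1])).countP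
        (fun ab => decide (ab.2 - ab.1 ≠ 1)) := by
  show bpLoop ((0 : Int) :: (P ++ [(P.length : Int) + 1])) 0 0 - 1 = _
  have h0 : (0 : Nat) < ((0 : Int) :: (P ++ [(P.length : Int) + 1])).length := by simp
  rw [bpLoop_eq _ 0 0 h0, badCount_zip]
  simp

-- The index loop of A reads exactly the adjacent pairs of P.
lemma pairs_eq (P : List Int) :
    (PySem.List.pyRange 0 ((P.length : Int) - 1) 1).map
      (fun i => (PySem.List.pyGetD P i 0, PySem.List.pyGetD P (i + 1) 0)) = P.zip P.tail := by
  apply List.ext_getElem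
  · simp [PySem.List.length_pyRange_one]
  · intro k h1 h2
    have hk : k < P.length - 1 := by
      simp [PySem.List.length_pyRange_one] at h1; omega
    simp [PySem.List.getElem_pyRange_one]
    constructor
    · simp [List.getElem?_eq_getElem (show k < P.length by omega)]
    · rw [show ((k : Int) + 1) = (((k + 1 : Nat) : Int)) by push_cast; ring]
      rw [PySem.List.pyGetD_natCast]
      simp [List.getElem?_eq_getElem (show k + 1 < P.length by omega)]

-- Appending a sentinel to the end appends one pair to the adjacent-pair list.
lemma zip_snoc (l : List Int) (x m : Int) :
    ((x :: l) ++ [m]).zip (l ++ [m]) =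
      (x :: l).zip l ++ [((x :: l).getLast (by simp), m)] := by
  induction l generalizing x with
  | nil => simp
  | cons y t ih =>
    have ih' := ih y
    simp only [List.cons_append, List.zip_cons_cons] at ih' ⊢
    rw [ih']
    simp

-- ===== VERDICT =====
theorem breakpoints_spec : Claim_equal_breakpoints := by
  intro P _ hP
  unfold Spec_breakpoints breakpoints
  rw [alt_eq]
  obtain ⟨p, ps, rfl⟩ := List.exists_cons_of_ne_nil hP
  rw [PySem.List.foldl_ite_add_one]
  have hA : (PySem.List.pyRange 0 (((p :: ps).length : Int) - 1) 1).countP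
      (fun i => decide (PySem.List.pyGetD (p :: ps) (i + 1) 0 - PySem.List.pyGetD (p :: ps) i 0 = 1))
      = ((p :: ps).zip ps).countP (fun ab => decide (ab.2 - ab.1 = 1)) := by
    have hpe := pairs_eq (p :: ps)
    rw [List.tail_cons] at hpe
    rw [← hpe, List.countP_map]
    rfl
  rw [hA]
  set n : Int := ((p :: ps).length : Int) with hn
  have hzip : ((0 : Int) :: ((p :: ps) ++ [n + 1])).zip ((p :: ps) ++ [n + 1])
      = (0, p) :: (((p :: ps) ++ [n + 1]).zip (ps ++ [n + 1])) := by
    simp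
  rw [hzip, zip_snoc ps p (n + 1)]
  rw [PySem.List.pyGetD_zero_cons, PySem.List.pyGetD_neg_one _ _ hP]
  set L := (p :: ps).zip ps with hL
  have hlen : L.length = ps.length := by
    rw [hL]; simp
  rw [List.countP_cons, List.countP_append, List.countP_cons, List.countP_nil]
  set c := L.countP (fun ab => decide (ab.2 - ab.1 = 1)) with hc
  have hle : c ≤ L.length := List.countP_le_length
  have hne : L.countP (fun ab => decide (ab.2 - ab.1 ≠ 1)) = L.length - c := by
    have hsplit : L.length = L.countP (fun ab => decide (ab.2 - ab.1 = 1))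
        + L.countP (fun ab => !decide (ab.2 - ab.1 = 1)) := by
      simpa using List.length_eq_countP_add_countP
        (p := fun ab => decide (ab.2 - ab.1 = 1)) (l := L)
    have he : L.countP (fun ab => decide (ab.2 - ab.1 ≠ 1))
        = L.countP (fun ab => !(decide (ab.2 - ab.1 = 1))) := by
      apply List.countP_congr; intro x _; simp
    omega
  set g := (p :: ps).getLast (by simp) with hg
  have hn1 : n = (ps.length : Int) + 1 := by rw [hn]; push_cast [List.length_cons]; ring
  rw [hne, hlen]
  split_ifs with h1 h2 h3 h4 h5 h6 h7 h8 <;> simp_all <;> omega
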